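-- pv_equiv track=rewrite | github.com/WHT413/E2E_ChessCobotSystem | middleware/chess_game_show.py | positions_to_fen
-- ===== SOURCE A (Python) =====
-- from typing import Dict, List, Tuple, Optional
--
-- def positions_to_fen(positions: Dict[Tuple[int, int], str]) -> str:
--     """Convert position dict to FEN board part."""
--     rows = []
--     for row in range(8):
--         row_str = ""
--         empty_count = 0
--         for col in range(8):
--             piece = positions.get((col, row))
--             if piece:
--                 if empty_count > 0:
--                     row_str += str(empty_count)
--                     empty_count = 0
--                 row_str += piece
--             else:
--                 empty_count += 1
--         if empty_count > 0:
--             row_str += str(empty_count)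
--         rows.append(row_str)
--     return "/".join(rows)
-- ===== SOURCE B (Python) =====
-- def positions_to_fen(positions):
--     """Convert position dict to FEN board part.
--
--     Alternative decomposition: materialize each row's 8 cells first, then
--     compress empty runs by recursive span-splitting instead of an inline counter.
--     """
--     rows = []
--     for row in range(8):
--         cells = [positions.get((col, row)) or "" for col in range(8)]
--         rows.append(_compress(cells))
--     return "/".join(rows)
--
--
-- def _compress(cells):
--     if not cells:
--         return ""
--     if cells[0]:
--         return cells[0] + _compress(cells[1:])
--     k = 0
--     while k < len(cells) and not cells[k]:
--         k += 1
--     return str(k) + _compress(cells[k:])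
-- ===== Notes on version B (the rewrite author's own statement) =====
-- stated objective: alternative
-- what changed: B materializes each row's 8 cell values first (normalizing None/'' to '') and compresses empty runs by recursive span-splitting (takeWhile/dropWhile style), replacing A's inline empty-counter state machine.
import Mathlib
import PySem

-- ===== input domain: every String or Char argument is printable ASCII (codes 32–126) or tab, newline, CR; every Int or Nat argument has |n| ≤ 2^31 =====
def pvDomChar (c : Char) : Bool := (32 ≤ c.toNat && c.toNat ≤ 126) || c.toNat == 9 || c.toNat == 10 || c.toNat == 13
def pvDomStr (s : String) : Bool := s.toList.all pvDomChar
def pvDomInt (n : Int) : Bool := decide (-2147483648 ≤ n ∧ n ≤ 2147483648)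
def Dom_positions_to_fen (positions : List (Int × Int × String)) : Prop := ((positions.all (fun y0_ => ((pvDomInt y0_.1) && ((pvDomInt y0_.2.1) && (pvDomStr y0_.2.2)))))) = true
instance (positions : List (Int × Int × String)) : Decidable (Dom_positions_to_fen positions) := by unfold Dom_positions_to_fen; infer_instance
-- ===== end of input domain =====

-- B materializes each row's 8 cells first and compresses empty runs by recursive
-- span-splitting, instead of A's inline empty-counter state machine (objective: alternative).


-- shared parameter decoding: the Python argument is a dict {(col,row): piece}
def pvToDict (positions : List (Int × Int × String)) : PySem.Dict (Int × Int) String :=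
  PySem.Dict.ofList (positions.map (fun p => ((p.1, p.2.1), p.2.2)))

-- ===== PORT A =====
def positions_to_fen (positions : List (Int × Int × String)) : String :=
  let d := pvToDict positions
  let rows := (PySem.List.pyRange 0 8 1).foldl (fun (rows : List (List Char)) row =>
    let st := (PySem.List.pyRange 0 8 1).foldl (fun (st : List Char × Int) col =>
      match PySem.Dict.get? d (col, row) with
      | some s =>
          if s.toList = [] then (st.1, st.2 + 1)
          else ((if st.2 > 0 then st.1 ++ PySem.Int.toChars st.2 else st.1) ++ s.toList, 0)
      | none => (st.1, st.2 + 1)) ([], 0)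
    rows ++ [if st.2 > 0 then st.1 ++ PySem.Int.toChars st.2 else st.1]) []
  String.mk (List.intercalate ['/'] rows)

-- ===== PORT B =====
def pvCompress : List (List Char) → List Char
  | [] => []
  | c :: rest =>
    if c = [] then
      PySem.Int.toChars (((c :: rest).takeWhile (fun x => x = [])).length : Int)
        ++ pvCompress ((c :: rest).dropWhile (fun x => x = []))
    else c ++ pvCompress rest
  termination_by cs => cs.length
  decreasing_by
    · simp_all [List.dropWhile]
      exact List.length_dropWhile_le _ _
    · simp

def positions_to_fen_alt (positions : List (Int × Int × String)) : String :=
  let d := pvToDict positions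
  String.mk (List.intercalate ['/'] ((PySem.List.pyRange 0 8 1).map (fun row =>
    pvCompress ((PySem.List.pyRange 0 8 1).map
      (fun col => ((PySem.Dict.get? d (col, row)).getD "").toList)))))

-- ===== PRECONDITION & SPEC =====
def Spec_positions_to_fen (positions : List (Int × Int × String)) (out : String) : Prop := out = positions_to_fen_alt positions
instance (positions : List (Int × Int × String)) (out : String) : Decidable (Spec_positions_to_fen positions out) := by unfold Spec_positions_to_fen; infer_instance

-- ===== CLAIM (what is proved, stated in full; the proofs are below) =====
def Claim_equal_positions_to_fen : Prop := ∀ (positions : List (Int × Int × String)), Dom_positions_to_fen positions → Spec_positions_to_fen positions (positions_to_fen positions)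

-- ===== LEMMAS AND PROOFS =====

-- A's inner loop body, as a function of the (None/"" -> []) normalized cell
def pvStepA (st : List Char × Int) (c : List Char) : List Char × Int :=
  if c = [] then (st.1, st.2 + 1)
  else ((if st.2 > 0 then st.1 ++ PySem.Int.toChars st.2 else st.1) ++ c, 0)

def pvFinish (st : List Char × Int) : List Char :=
  if st.2 > 0 then st.1 ++ PySem.Int.toChars st.2 else st.1

-- A's state machine, written as recursion on the cell list with the pending counter explicit
def pvCPrime (ec : Int) : List (List Char) → List Char
  | [] => if ec > 0 then PySem.Int.toChars ec else []
  | c :: rest =>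
    if c = [] then pvCPrime (ec + 1) rest
    else (if ec > 0 then PySem.Int.toChars ec else []) ++ c ++ pvCPrime 0 rest

lemma pvFold_eq (cs : List (List Char)) : ∀ (acc : List Char) (ec : Int),
    pvFinish (cs.foldl pvStepA (acc, ec)) = acc ++ pvCPrime ec cs := by
  induction cs with
  | nil => intro acc ec; simp [pvFinish, pvCPrime]; split <;> simp
  | cons c rest ih =>
    intro acc ec
    simp only [List.foldl_cons, pvStepA, pvCPrime]
    by_cases hc : c = [] <;> simp [hc, ih]
    split <;> simp

lemma pvCPrime_eq (cs : List (List Char)) :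
    pvCPrime 0 cs = pvCompress cs ∧
      ∀ ec : Int, 0 < ec → pvCPrime ec cs =
        PySem.Int.toChars (ec + ((cs.takeWhile (fun x => x = [])).length : Int))
          ++ pvCompress (cs.dropWhile (fun x => x = [])) := by
  induction cs with
  | nil =>
    constructor
    · simp [pvCPrime, pvCompress]
    · intro ec hec; simp [pvCPrime, pvCompress, hec]
  | cons c rest ih =>
    by_cases hc : c = []
    · constructor
      · rw [show pvCPrime 0 (c :: rest) = pvCPrime 1 rest by simp [pvCPrime, hc]]
        rw [ih.2 1 (by norm_num)]
        simp [pvCompress, hc, List.takeWhile, List.dropWhile]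
        ring_nf
      · intro ec hec
        rw [show pvCPrime ec (c :: rest) = pvCPrime (ec + 1) rest by simp [pvCPrime, hc]]
        rw [ih.2 (ec + 1) (by omega)]
        simp [hc, List.takeWhile, List.dropWhile]
        ring_nf
    · constructor
      · simp [pvCPrime, pvCompress, hc, ih.1]
      · intro ec hec
        simp [pvCPrime, pvCompress, hc, ih.1, hec, List.takeWhile, List.dropWhile]

lemma pvRow_eq (d : PySem.Dict (Int × Int) String) (row : Int) :
    pvFinish ((PySem.List.pyRange 0 8 1).foldl (fun (st : List Char × Int) col =>
      match PySem.Dict.get? d (col, row) with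
      | some s =>
          if s.toList = [] then (st.1, st.2 + 1)
          else ((if st.2 > 0 then st.1 ++ PySem.Int.toChars st.2 else st.1) ++ s.toList, 0)
      | none => (st.1, st.2 + 1)) ([], 0)) =
    pvCompress ((PySem.List.pyRange 0 8 1).map
      (fun col => ((PySem.Dict.get? d (col, row)).getD "").toList)) := by
  have hbody : ∀ (st : List Char × Int) (col : Int),
      (match PySem.Dict.get? d (col, row) with
      | some s =>
          if s.toList = [] then (st.1, st.2 + 1)
          else ((if st.2 > 0 then st.1 ++ PySem.Int.toChars st.2 else st.1) ++ s.toList, 0)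
      | none => (st.1, st.2 + 1)) =
      pvStepA st (((PySem.Dict.get? d (col, row)).getD "").toList) := by
    intro st col
    cases PySem.Dict.get? d (col, row) with
    | none => simp [pvStepA]
    | some s => simp [pvStepA]
  calc pvFinish ((PySem.List.pyRange 0 8 1).foldl _ ([], 0))
      = pvFinish (((PySem.List.pyRange 0 8 1).map
          (fun col => ((PySem.Dict.get? d (col, row)).getD "").toList)).foldl pvStepA ([], 0)) := by
        rw [List.foldl_map]
        congr 1
        apply List.foldl_ext
        intro acc x _
        exact hbody acc x
    _ = _ := by
        rw [pvFold_eq, (pvCPrime_eq _).1]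
        simp

-- ===== VERDICT (by name: the statement is the Claim_ definition above) =====
theorem positions_to_fen_spec : Claim_equal_positions_to_fen := by
  intro positions _
  show positions_to_fen positions = positions_to_fen_alt positions
  unfold positions_to_fen positions_to_fen_alt
  dsimp only
  congr 1
  rw [PySem.List.foldl_append_singleton_eq_map, List.nil_append]
  congr 1
  exact List.map_congr_left (fun row _ => pvRow_eq (pvToDict positions) row)
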